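-- pv_equiv track=rewrite | github.com/prometeyqwe/Acars-Decoder | demodulator.py | search_max
-- ===== SOURCE A (Python) =====
-- def search_max(a):
--     el_max = a[0]
--     for elm in a[1:]:
--         if elm > el_max:
--             el_max = elm
--     if el_max == a[0] or el_max == a[-1]:
--         return False
--     else:
--         return True
-- ===== SOURCE B (Python) =====
-- def search_max(a):
--     first = a[0]
--     last = a[-1]
--     return any(x > first and x > last for x in a)
-- ===== Notes on version B (the rewrite author's own statement) =====
-- stated objective: simpler
-- what changed: Replaces the find-the-maximum-then-compare-to-endpoints loop with a single any() predicate scan asking whether some element strictly exceeds both endpoints, keeping only a boolean instead of a running max.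
import Mathlib
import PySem

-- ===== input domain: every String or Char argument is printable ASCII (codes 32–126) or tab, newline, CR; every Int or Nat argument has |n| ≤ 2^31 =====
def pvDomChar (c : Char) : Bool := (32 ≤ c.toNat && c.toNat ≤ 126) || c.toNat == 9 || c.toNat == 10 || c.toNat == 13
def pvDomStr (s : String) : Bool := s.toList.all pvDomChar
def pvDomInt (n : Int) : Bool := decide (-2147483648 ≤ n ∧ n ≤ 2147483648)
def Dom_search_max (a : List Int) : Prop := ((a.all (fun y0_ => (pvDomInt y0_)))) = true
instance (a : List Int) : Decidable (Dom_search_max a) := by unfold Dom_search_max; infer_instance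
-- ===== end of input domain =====

-- B replaces A's find-the-maximum-then-compare loop with a single any-element-beats-both-endpoints scan (simpler).


-- ===== PORT A =====
-- el_max = a[0]; for elm in a[1:]: if elm > el_max: el_max = elm;
-- return False if el_max == a[0] or el_max == a[-1] else True
-- (the [] branch is a totality guard; Pre_ excludes [] where Python raises IndexError)
def search_max (a : List Int) : Bool :=
  match a with
  | [] => false
  | x :: xs =>
    let el_max := xs.foldl (fun m elm => if elm > m then elm else m) x
    if el_max = x ∨ el_max = (x :: xs).getLast (by simp) then false else true

-- ===== PORT B =====
-- first = a[0]; last = a[-1]; return any(x > first and x > last for x in a)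
def search_max_alt (a : List Int) : Bool :=
  match a with
  | [] => false
  | x :: xs =>
    let last := (x :: xs).getLast (by simp)
    (x :: xs).any (fun e => decide (e > x) && decide (e > last))

-- ===== PRECONDITION & SPEC =====
-- Pre_ excludes only the empty list, on which both A and B raise IndexError.
def Pre_search_max (a : List Int) : Prop := a ≠ []
instance (a : List Int) : Decidable (Pre_search_max a) := by unfold Pre_search_max; infer_instance
def pvWitness_search_max : List Int := [1, 3, 2]

def Spec_search_max (a : List Int) (out : Bool) : Prop := out = search_max_alt a
instance (a : List Int) (out : Bool) : Decidable (Spec_search_max a out) := by unfold Spec_search_max; infer_instance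

-- ===== CLAIM (what is proved, stated in full; the proofs are below) =====
def Claim_equal_search_max : Prop := ∀ (a : List Int), Dom_search_max a → Pre_search_max a → Spec_search_max a (search_max a)

-- ===== LEMMAS AND PROOFS =====

def pvMaxStep : Int → Int → Int := fun m elm => if elm > m then elm else m

theorem pvFold_ge (xs : List Int) (x : Int) : x ≤ xs.foldl pvMaxStep x := by
  induction xs generalizing x with
  | nil => simp
  | cons e es ih =>
    simp only [List.foldl, pvMaxStep]
    split_ifs with h
    · exact le_trans (le_of_lt h) (ih e)
    · exact ih x

theorem pvFold_mem_le (xs : List Int) (x e : Int) (he : e ∈ xs) :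
    e ≤ xs.foldl pvMaxStep x := by
  induction xs generalizing x with
  | nil => simp at he
  | cons a as ih =>
    simp only [List.foldl]
    rcases List.mem_cons.mp he with rfl | h
    · have : e ≤ pvMaxStep x e := by
        simp only [pvMaxStep]; split_ifs with h <;> omega
      exact le_trans this (pvFold_ge as _)
    · exact ih _ h

theorem pvFold_mem (xs : List Int) (x : Int) :
    xs.foldl pvMaxStep x = x ∨ xs.foldl pvMaxStep x ∈ xs := by
  induction xs generalizing x with
  | nil => simp
  | cons a as ih =>
    simp only [List.foldl, pvMaxStep]
    split_ifs with h
    · rcases ih a with h' | h'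
      · right; simp [h']
      · right; exact List.mem_cons_of_mem _ h'
    · rcases ih x with h' | h'
      · left; exact h'
      · right; exact List.mem_cons_of_mem _ h'

theorem pvCore (x last m : Int) (l : List Int)
    (hmx : x ≤ m) (hml : ∀ e ∈ l, e ≤ m) (hmm : m ∈ l) (hlm : last ∈ l) :
    (if m = x ∨ m = last then false else true)
      = l.any (fun e => decide (e > x) && decide (e > last)) := by
  split_ifs with h
  · symm
    rw [List.any_eq_false]
    intro e he
    have hex : e ≤ m := hml e he
    simp only [Bool.and_eq_true, decide_eq_true_eq, not_and, gt_iff_lt]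
    intro hxe
    rcases h with rfl | rfl <;> omega
  · rw [not_or] at h
    symm
    rw [List.any_eq_true]
    refine ⟨m, hmm, ?_⟩
    simp only [Bool.and_eq_true, decide_eq_true_eq, gt_iff_lt]
    exact ⟨lt_of_le_of_ne hmx (Ne.symm h.1), lt_of_le_of_ne (hml last hlm) (Ne.symm h.2)⟩

-- ===== VERDICT (by name: the statement is the Claim_ definition above) =====
theorem search_max_spec : Claim_equal_search_max := by
  intro a _ hpre
  unfold Spec_search_max
  match a with
  | [] => exact absurd rfl hpre
  | x :: xs =>
    simp only [search_max, search_max_alt]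
    have hmle : ∀ e ∈ x :: xs, e ≤ xs.foldl pvMaxStep x := by
      intro e he
      rcases List.mem_cons.mp he with rfl | h
      · exact pvFold_ge xs _
      · exact pvFold_mem_le xs x e h
    have hmmem : xs.foldl pvMaxStep x ∈ x :: xs := by
      rcases pvFold_mem xs x with h | h
      · rw [h]; exact List.mem_cons_self
      · exact List.mem_cons_of_mem _ h
    exact pvCore x ((x :: xs).getLast (by simp)) (xs.foldl pvMaxStep x) (x :: xs)
      (pvFold_ge xs x) hmle hmmem (List.getLast_mem _)
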